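-- pv_equiv track=rewrite | github.com/pypi-data/pypi-mirror-373 | packages/pacfix/pacfix-0.0.4.tar.gz/pacfix-0.0.4/src/pacfix/utils.py | parse_valuations_uni
-- ===== SOURCE A (Python) =====
-- from typing import List, Dict, TextIO, Tuple, Set
--
-- def parse_valuations_uni(neg: List[str], pos: List[str]) -> Tuple[List[Dict[int, int]], List[Dict[int, int]]]:
--     neg_vals = list()
--     pos_vals = list()
--     for valuation in neg:
--         groups: List[Dict[int, int]] = list()
--         val_map: Dict[int, int] = dict()
--         for line in valuation.split("\n"):
--             if line.startswith("#") or len(line) < 3: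
--                 continue
--             if line.startswith("----------------------------"):
--                 groups.append(val_map)
--                 val_map = dict()
--             elif line.startswith("__valuation:"):
--                 value_str = line.removeprefix("__valuation:").strip()
--                 tokens = value_str.split()
--                 id = tokens[4].strip()
--                 val = tokens[5].strip()
--                 val_map[int(id)] = int(val)
--         # Only last one is negative
--         for i in range(len(groups)):
--             val_map = groups[i]
--             if i < len(groups) - 1:
--                 pos_vals.append(val_map)
--             else:
--                 neg_vals.append(val_map)
--     for valuation in pos:
--         groups = list()
--         in_group = False
--         val_map = dict()
--         for line in valuation.split("\n"):
--             if line.startswith("#") or len(line) < 3: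
--                 continue
--             if line.startswith("----------------------------"):
--                 groups.append(val_map)
--                 val_map = dict()
--             elif line.startswith("__valuation:"):
--                 value_str = line[len("__valuation:"):].strip()
--                 tokens = value_str.split()
--                 id = tokens[4].strip()
--                 val = tokens[5].strip()
--                 val_map[int(id)] = int(val)
--         for val_map in groups:
--             pos_vals.append(val_map)
--     return neg_vals, pos_vals
-- ===== SOURCE B (Python) =====
-- from typing import List, Dict, Tuple
--
-- _SEP = "-" * 28
-- _PREFIX = "__valuation:"
--
--
-- def _relevant(text: str) -> List[str]:
--     """The lines that can affect the result: not comments, length >= 3,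
--     and either a separator or a '__valuation:' line."""
--     return [l for l in text.split("\n")
--             if not l.startswith("#") and len(l) >= 3
--             and (l.startswith(_SEP) or l.startswith(_PREFIX))]
--
--
-- def _chunks(ls: List[str]) -> List[List[str]]:
--     """Build the separator-closed chunks BACK-TO-FRONT by a reverse scan:
--     a chunk is open only once a separator has been seen from the end, so the
--     trailing lines after the last separator are dropped for free."""
--     rev_chunks: List[List[str]] = []
--     open_chunk = None
--     for line in reversed(ls):
--         if line.startswith(_SEP):
--             if open_chunk is not None:
--                 rev_chunks.append(open_chunk)
--             open_chunk = []
--         elif open_chunk is not None: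
--             open_chunk.append(line)
--     if open_chunk is not None:
--         rev_chunks.append(open_chunk)
--     return [c[::-1] for c in reversed(rev_chunks)]
--
--
-- def _parse(chunk: List[str]) -> Dict[int, int]:
--     tokens = [line[len(_PREFIX):].split() for line in chunk]
--     return {int(t[4]): int(t[5]) for t in tokens}
--
--
-- def _dicts(text: str) -> List[Dict[int, int]]:
--     return [_parse(c) for c in _chunks(_relevant(text))]
--
--
-- def parse_valuations_uni(neg: List[str], pos: List[str]) -> Tuple[List[Dict[int, int]], List[Dict[int, int]]]:
--     neg_groups = [_dicts(v) for v in neg]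
--     neg_vals = [g[-1] for g in neg_groups if g]
--     pos_vals = [d for g in neg_groups for d in g[:-1]] + \
--                [d for v in pos for d in _dicts(v)]
--     return neg_vals, pos_vals
-- ===== Notes on version B (the rewrite author's own statement) =====
-- stated objective: alternative
-- what changed: B replaces A's forward per-line state machine (a dict built incrementally while scanning, then an indexed redistribution loop) with a reverse scan that builds the separator-closed chunks back-to-front -- a chunk is open only once a separator has been seen from the end, so the trailing open chunk is dropped for free -- followed by dict-comprehension parsing of each chunk and flat comprehensions (filter/slice over the precomputed group lists) for the neg/pos routing.
import Mathlib
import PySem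

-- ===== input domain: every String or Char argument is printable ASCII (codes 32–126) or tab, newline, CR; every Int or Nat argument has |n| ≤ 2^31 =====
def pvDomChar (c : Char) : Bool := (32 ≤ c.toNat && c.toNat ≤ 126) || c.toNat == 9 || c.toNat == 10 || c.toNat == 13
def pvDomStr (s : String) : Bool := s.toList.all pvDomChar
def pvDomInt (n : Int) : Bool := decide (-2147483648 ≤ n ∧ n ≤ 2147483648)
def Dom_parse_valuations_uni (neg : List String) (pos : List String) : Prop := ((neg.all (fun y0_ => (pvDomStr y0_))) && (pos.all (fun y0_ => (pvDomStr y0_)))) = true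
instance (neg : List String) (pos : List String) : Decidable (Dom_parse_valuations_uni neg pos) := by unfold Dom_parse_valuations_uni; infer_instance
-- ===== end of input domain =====

-- B rebuilds the separator-closed chunks BACK-TO-FRONT by a reverse scan (the
-- trailing open chunk after the last separator is dropped for free), then parses
-- each chunk and routes neg/pos by flat filter/slice comprehensions, instead of
-- A's forward per-line state machine with an indexed redistribution loop;
-- same cost, 'alternative'.

-- ===== PORT A =====
def pvSep : List Char := "----------------------------".toList   -- 28 dashes
def pvPref : List Char := "__valuation:".toList

-- str.removeprefix, ported by hand (exact: drop the prefix iff it is a prefix)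
def pvRemoveprefix (s p : List Char) : List Char :=
  if PySem.Chars.startswith s p then s.drop p.length else s

-- the body of A's per-line loop (neg branch; uses removeprefix)
def pvA_lineStep (st : List (PySem.Dict Int Int) × PySem.Dict Int Int) (line : List Char) :
    List (PySem.Dict Int Int) × PySem.Dict Int Int :=
  if PySem.Chars.startswith line ['#'] || decide (line.length < 3) then st
  else if PySem.Chars.startswith line pvSep then (st.1 ++ [st.2], PySem.Dict.empty)
  else if PySem.Chars.startswith line pvPref then
    let value_str := PySem.Chars.strip (pvRemoveprefix line pvPref)
    let tokens := PySem.Chars.split₀ value_str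
    let id := PySem.Chars.strip (PySem.List.pyGetD tokens 4 [])
    let val := PySem.Chars.strip (PySem.List.pyGetD tokens 5 [])
    -- int(...) raises on a malformed token: excluded by Pre_; .getD 0 is the total stand-in
    (st.1, st.2.insert ((PySem.Int.ofChars? id).getD 0) ((PySem.Int.ofChars? val).getD 0))
  else st

-- the body of A's per-line loop (pos branch; uses line[len("__valuation:"):])
def pvA_lineStep2 (st : List (PySem.Dict Int Int) × PySem.Dict Int Int) (line : List Char) :
    List (PySem.Dict Int Int) × PySem.Dict Int Int :=
  if PySem.Chars.startswith line ['#'] || decide (line.length < 3) then st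
  else if PySem.Chars.startswith line pvSep then (st.1 ++ [st.2], PySem.Dict.empty)
  else if PySem.Chars.startswith line pvPref then
    let value_str := PySem.Chars.strip (PySem.List.slice line (some 12) none)
    let tokens := PySem.Chars.split₀ value_str
    let id := PySem.Chars.strip (PySem.List.pyGetD tokens 4 [])
    let val := PySem.Chars.strip (PySem.List.pyGetD tokens 5 [])
    (st.1, st.2.insert ((PySem.Int.ofChars? id).getD 0) ((PySem.Int.ofChars? val).getD 0))
  else st

-- A's body of 'for valuation in neg'
def pvA_negStep (acc : (List (List (Int × Int))) × (List (List (Int × Int)))) (valuation : String) :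
    (List (List (Int × Int))) × (List (List (Int × Int))) :=
  let st := (PySem.Chars.splitOn valuation.toList ['\n']).foldl pvA_lineStep ([], PySem.Dict.empty)
  let groups := st.1
  (PySem.List.pyRange 0 (PySem.List.len groups) 1).foldl (fun acc2 i =>
    let val_map := PySem.List.pyGetD groups i PySem.Dict.empty
    if i < PySem.List.len groups - 1 then (acc2.1, acc2.2 ++ [val_map.items])
    else (acc2.1 ++ [val_map.items], acc2.2)) acc

-- A's body of 'for valuation in pos' ('in_group' is dead in A and not ported)
def pvA_posStep (acc : (List (List (Int × Int))) × (List (List (Int × Int)))) (valuation : String) :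
    (List (List (Int × Int))) × (List (List (Int × Int))) :=
  let st := (PySem.Chars.splitOn valuation.toList ['\n']).foldl pvA_lineStep2 ([], PySem.Dict.empty)
  (acc.1, st.1.foldl (fun pv g => pv ++ [g.items]) acc.2)

def parse_valuations_uni (neg : List String) (pos : List String) :
    (List (List (Int × Int))) × (List (List (Int × Int))) :=
  let acc1 := neg.foldl pvA_negStep ([], [])
  pos.foldl pvA_posStep acc1

-- ===== PORT B =====
-- the lines that can affect the result (Source B's _relevant comprehension filter)
def pvB_keep (l : List Char) : Bool :=
  !(PySem.Chars.startswith l ['#']) && decide (3 ≤ l.length)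
    && (PySem.Chars.startswith l pvSep || PySem.Chars.startswith l pvPref)

def pvB_relevant (text : String) : List (List Char) :=
  (PySem.Chars.splitOn text.toList ['\n']).filter pvB_keep

-- one step of Source B's reverse scan: state = (rev_chunks, open_chunk or None)
def pvB_bstep (st : List (List (List Char)) × Option (List (List Char))) (line : List Char) :
    List (List (List Char)) × Option (List (List Char)) :=
  if PySem.Chars.startswith line pvSep then
    match st.2 with
    | some c => (st.1 ++ [c], some [])
    | none => (st.1, some [])
  else
    match st.2 with
    | some c => (st.1, some (c ++ [line]))
    | none => st

-- Source B's _chunks: reverse scan, then un-reverse the chunk list and each chunk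
def pvB_chunks (ls : List (List Char)) : List (List (List Char)) :=
  let st := ls.reverse.foldl pvB_bstep ([], none)
  let rev_chunks := match st.2 with | some c => st.1 ++ [c] | none => st.1
  rev_chunks.reverse.map List.reverse

-- Source B's _parse: tokens of every line, then a dict comprehension over them
def pvB_parse (chunk : List (List Char)) : PySem.Dict Int Int :=
  let tokens := chunk.map (fun line => PySem.Chars.split₀ (PySem.List.slice line (some 12) none))
  tokens.foldl (fun d t =>
    d.insert ((PySem.Int.ofChars? (PySem.List.pyGetD t 4 [])).getD 0)
             ((PySem.Int.ofChars? (PySem.List.pyGetD t 5 [])).getD 0)) PySem.Dict.empty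

def pvB_dicts (text : String) : List (PySem.Dict Int Int) :=
  (pvB_chunks (pvB_relevant text)).map pvB_parse

def parse_valuations_uni_alt (neg : List String) (pos : List String) :
    (List (List (Int × Int))) × (List (List (Int × Int))) :=
  let neg_groups := neg.map pvB_dicts
  let neg_vals := (neg_groups.filter (fun g => !g.isEmpty)).map
      (fun g => (PySem.List.pyGetD g (-1) PySem.Dict.empty).items)
  let pos_vals := (neg_groups.flatMap (fun g => PySem.List.slice g none (some (-1)))).map PySem.Dict.items
      ++ (pos.flatMap pvB_dicts).map PySem.Dict.items
  (neg_vals, pos_vals)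

-- ===== PRECONDITION & SPEC =====
-- Pre_ excludes exactly the inputs on which A raises: a '__valuation:' line whose
-- payload has fewer than 6 whitespace-separated tokens (IndexError) or whose 5th/6th
-- token is not an int literal (ValueError).
def pvLineOk (line : List Char) : Bool :=
  if PySem.Chars.startswith line ['#'] || decide (line.length < 3) then true
  else if PySem.Chars.startswith line pvSep then true
  else if PySem.Chars.startswith line pvPref then
    let tokens := PySem.Chars.split₀ (line.drop 12)
    decide (6 ≤ tokens.length)
      && (PySem.Int.ofChars? (PySem.List.pyGetD tokens 4 [])).isSome
      && (PySem.Int.ofChars? (PySem.List.pyGetD tokens 5 [])).isSome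
  else true

def Pre_parse_valuations_uni (neg : List String) (pos : List String) : Prop :=
  ∀ v ∈ neg ++ pos, ∀ line ∈ PySem.Chars.splitOn v.toList ['\n'], pvLineOk line = true
instance (neg : List String) (pos : List String) : Decidable (Pre_parse_valuations_uni neg pos) := by
  unfold Pre_parse_valuations_uni; infer_instance

def pvWitness_parse_valuations_uni : List String × List String :=
  (["__valuation: a b c d 7 8\n----------------------------"],
   ["#c\n__valuation: p q r s 1 2\n----------------------------\n__valuation: p q r s 3 4"])

def Spec_parse_valuations_uni (neg : List String) (pos : List String) (out : (List (List (Int × Int))) × (List (List (Int × Int)))) : Prop := out = parse_valuations_uni_alt neg pos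
instance (neg : List String) (pos : List String) (out : (List (List (Int × Int))) × (List (List (Int × Int)))) : Decidable (Spec_parse_valuations_uni neg pos out) := by unfold Spec_parse_valuations_uni; infer_instance

-- ===== CLAIM (what is proved, stated in full; the proofs are below) =====
def Claim_equal_parse_valuations_uni : Prop := ∀ (neg : List String) (pos : List String), Dom_parse_valuations_uni neg pos → Pre_parse_valuations_uni neg pos → Spec_parse_valuations_uni neg pos (parse_valuations_uni neg pos)

-- ===== LEMMAS AND PROOFS =====

-- proof-internal forward chunking machine (a reference point between A and B):
-- the state A's loop would carry if the dicts were kept as raw line chunks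
def pvF_chunkStep (st : List (List (List Char)) × List (List Char)) (line : List Char) :
    List (List (List Char)) × List (List Char) :=
  if PySem.Chars.startswith line ['#'] || decide (line.length < 3) then st
  else if PySem.Chars.startswith line pvSep then (st.1 ++ [st.2], [])
  else if PySem.Chars.startswith line pvPref then (st.1, st.2 ++ [line])
  else st

-- parse one chunk's lines into a dict, fused form (pvB_parse after foldl_map)
def pvF_parseChunk (lines : List (List Char)) : PySem.Dict Int Int :=
  lines.foldl (fun d line =>
    let tokens := PySem.Chars.split₀ (PySem.List.slice line (some 12) none)
    d.insert ((PySem.Int.ofChars? (PySem.List.pyGetD tokens 4 [])).getD 0)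
             ((PySem.Int.ofChars? (PySem.List.pyGetD tokens 5 [])).getD 0)) PySem.Dict.empty

theorem pvB_parse_eq_F (chunk : List (List Char)) : pvB_parse chunk = pvF_parseChunk chunk := by
  unfold pvB_parse pvF_parseChunk
  rw [List.foldl_map]

-- structural reference recursion for the chunk list (proof pivot between the
-- forward machine and B's reverse scan)
def pvChunksSpec : List (List Char) → List (List (List Char))
  | [] => []
  | l :: r =>
    if PySem.Chars.startswith l pvSep then [] :: pvChunksSpec r
    else match pvChunksSpec r with
      | [] => []
      | c :: cs => (l :: c) :: cs

def pvAttach (cur : List (List Char)) : List (List (List Char)) → List (List (List Char))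
  | [] => []
  | c :: cs => (cur ++ c) :: cs

theorem pvAttach_nil (L : List (List (List Char))) : pvAttach [] L = L := by
  cases L <;> simp [pvAttach]

theorem pvChunksSpec_cons_sep (l : List Char) (r : List (List Char))
    (hs : PySem.Chars.startswith l pvSep = true) :
    pvChunksSpec (l :: r) = [] :: pvChunksSpec r := by
  simp [pvChunksSpec, hs]

theorem pvChunksSpec_cons_nosep (l : List Char) (r : List (List Char))
    (hs : PySem.Chars.startswith l pvSep = false) :
    pvChunksSpec (l :: r) = match pvChunksSpec r with
      | [] => [] | c :: cs => (l :: c) :: cs := by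
  simp [pvChunksSpec, hs]

-- irrelevant lines are no-ops of the forward machine: fold over raw = fold over filtered
theorem pvF_fold_filter (raw : List (List Char)) :
    ∀ st, raw.foldl pvF_chunkStep st = (raw.filter pvB_keep).foldl pvF_chunkStep st := by
  induction raw with
  | nil => intro st; rfl
  | cons l r ih =>
    intro st
    by_cases hk : pvB_keep l = true
    · rw [List.filter_cons_of_pos hk, List.foldl_cons, List.foldl_cons, ih]
    · have hstep : pvF_chunkStep st l = st := by
        unfold pvF_chunkStep
        by_cases h1 : (PySem.Chars.startswith l ['#'] || decide (l.length < 3)) = true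
        · rw [if_pos h1]
        · rw [if_neg h1]
          simp only [Bool.or_eq_true, not_or, Bool.not_eq_true, decide_eq_true_eq] at h1
          have hno : PySem.Chars.startswith l pvSep = false ∧
              PySem.Chars.startswith l pvPref = false := by
            unfold pvB_keep at hk
            simp only [h1.1, Bool.not_false, Bool.true_and] at hk
            have h3 : l.length ≥ 3 := by
              have := h1.2; omega
            simp only [decide_eq_true (by omega : 3 ≤ l.length), Bool.true_and] at hk
            simp only [Bool.or_eq_true, not_or, Bool.not_eq_true] at hk
            exact hk
          rw [if_neg (by simp [hno.1]), if_neg (by simp [hno.2])]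
      rw [List.filter_cons_of_neg (by simp [hk]), List.foldl_cons, hstep, ih]

-- forward machine on kept lines = the structural recursion, up to the open chunk
theorem pvF_fold_spec (ls : List (List Char)) (hk : ∀ l ∈ ls, pvB_keep l = true) :
    ∀ cs cur, (ls.foldl pvF_chunkStep (cs, cur)).1 = cs ++ pvAttach cur (pvChunksSpec ls) := by
  induction ls with
  | nil => intro cs cur; simp [pvChunksSpec, pvAttach]
  | cons l r ih =>
    intro cs cur
    have hl := hk l List.mem_cons_self
    have hr := fun x hx => hk x (List.mem_cons_of_mem l hx)
    unfold pvB_keep at hl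
    simp only [Bool.and_eq_true, Bool.not_eq_true', Bool.or_eq_true, decide_eq_true_eq] at hl
    have hskip : (PySem.Chars.startswith l ['#'] || decide (l.length < 3)) = false := by
      simp [hl.1.1]; omega
    rw [List.foldl_cons]
    by_cases hs : PySem.Chars.startswith l pvSep = true
    · have hstep : pvF_chunkStep (cs, cur) l = (cs ++ [cur], []) := by
        unfold pvF_chunkStep; rw [if_neg (by simp [hskip]), if_pos hs]
      rw [hstep, ih hr, pvAttach_nil, pvChunksSpec_cons_sep l r hs]
      simp [pvAttach]
    · have hp : PySem.Chars.startswith l pvPref = true := by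
        rcases hl.2 with h | h
        · exact absurd h hs
        · exact h
      have hstep : pvF_chunkStep (cs, cur) l = (cs, cur ++ [l]) := by
        unfold pvF_chunkStep; rw [if_neg (by simp [hskip]), if_neg hs, if_pos hp]
      rw [hstep, ih hr, pvChunksSpec_cons_nosep l r (by simpa using hs)]
      cases pvChunksSpec r <;> simp [pvAttach]

-- decode B's reverse-scan state into the chunk list it will produce
def pvDecode (st : List (List (List Char)) × Option (List (List Char))) :
    List (List (List Char)) :=
  (match st.2 with | some c => st.1 ++ [c] | none => st.1).reverse.map List.reverse

-- invariant of B's reverse scan (as a foldr): decode = the structural recursion,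
-- and no open chunk means no chunk at all
theorem pvB_foldr_spec (ls : List (List Char)) :
    pvDecode (ls.foldr (fun l st => pvB_bstep st l) ([], none)) = pvChunksSpec ls ∧
      ((ls.foldr (fun l st => pvB_bstep st l) ([], none)).2 = none →
        (ls.foldr (fun l st => pvB_bstep st l) ([], none)).1 = []) := by
  induction ls with
  | nil => exact ⟨rfl, fun _ => rfl⟩
  | cons l r ih =>
    obtain ⟨ih1, ih2⟩ := ih
    rw [List.foldr_cons]
    set st := r.foldr (fun l st => pvB_bstep st l) ([], none) with hst
    unfold pvChunksSpec
    by_cases hs : PySem.Chars.startswith l pvSep = true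
    · rw [if_pos hs]
      cases hop : st.2 with
      | none =>
        have h1 : st.1 = [] := ih2 hop
        have hd : pvChunksSpec r = [] := by
          rw [← ih1]; unfold pvDecode; rw [hop, h1]; rfl
        constructor
        · unfold pvB_bstep pvDecode
          rw [if_pos hs, hop, h1, hd]
          rfl
        · intro h; exact absurd h (by unfold pvB_bstep; rw [if_pos hs, hop]; simp)
      | some c =>
        constructor
        · unfold pvB_bstep pvDecode
          rw [if_pos hs, hop]
          simp only []
          rw [← ih1]; unfold pvDecode; rw [hop]
          simp
        · intro h; exact absurd h (by unfold pvB_bstep; rw [if_pos hs, hop]; simp)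
    · rw [if_neg hs]
      cases hop : st.2 with
      | none =>
        have h1 : st.1 = [] := ih2 hop
        have hd : pvChunksSpec r = [] := by
          rw [← ih1]; unfold pvDecode; rw [hop, h1]; rfl
        have hstep : pvB_bstep st l = st := by
          unfold pvB_bstep; rw [if_neg hs, hop]
        rw [hstep, hd]
        exact ⟨by rw [ih1, hd], ih2⟩
      | some c =>
        have hd : pvChunksSpec r = c.reverse :: st.1.reverse.map List.reverse := by
          rw [← ih1]; unfold pvDecode; rw [hop]; simp
        have hstep : pvB_bstep st l = (st.1, some (c ++ [l])) := by
          unfold pvB_bstep; rw [if_neg hs, hop]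
        rw [hstep, hd]
        constructor
        · unfold pvDecode; simp
        · intro h; simp at h
-- B's _chunks equals the structural recursion
theorem pvB_chunks_spec (ls : List (List Char)) : pvB_chunks ls = pvChunksSpec ls := by
  unfold pvB_chunks
  rw [List.foldl_reverse]
  exact (pvB_foldr_spec ls).1

-- the two defining equations of split₀.go, restated for rewriting
theorem pv_go_nil (cur : List Char) (acc : List (List Char)) :
    PySem.Chars.split₀.go [] cur acc =
      if cur.isEmpty then acc.reverse else (cur.reverse :: acc).reverse := by
  rw [PySem.Chars.split₀.go]

theorem pv_go_cons (c : Char) (rest cur : List Char) (acc : List (List Char)) :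
    PySem.Chars.split₀.go (c :: rest) cur acc =
      if PySem.Chars.isspace c then
        (if cur.isEmpty then PySem.Chars.split₀.go rest [] acc
         else PySem.Chars.split₀.go rest [] (cur.reverse :: acc))
      else PySem.Chars.split₀.go rest (c :: cur) acc := by
  rw [PySem.Chars.split₀.go]

-- tokens produced by split₀ contain no whitespace characters
theorem pv_go_no_space (s : List Char) : ∀ (cur : List Char) (acc : List (List Char)),
    (∀ c ∈ cur, PySem.Chars.isspace c = false) →
    (∀ t ∈ acc, ∀ c ∈ t, PySem.Chars.isspace c = false) →
    ∀ t ∈ PySem.Chars.split₀.go s cur acc, ∀ c ∈ t, PySem.Chars.isspace c = false := by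
  induction s with
  | nil =>
    intro cur acc hcur hacc t ht
    simp only [PySem.Chars.split₀.go] at ht
    split at ht
    · simp only [List.mem_reverse] at ht; exact hacc t ht
    · simp only [List.mem_reverse, List.mem_cons] at ht
      rcases ht with h | h
      · subst h; intro c hc; exact hcur c (List.mem_reverse.mp hc)
      · exact hacc t h
  | cons c rest ih =>
    intro cur acc hcur hacc t ht
    simp only [PySem.Chars.split₀.go] at ht
    by_cases hsp : PySem.Chars.isspace c = true
    · rw [if_pos hsp] at ht
      split at ht
      · exact ih [] acc (by simp) hacc t ht
      · refine ih [] (cur.reverse :: acc) (by simp) ?_ t ht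
        intro u hu
        rcases List.mem_cons.mp hu with h | h
        · subst h; intro d hd; exact hcur d (List.mem_reverse.mp hd)
        · exact hacc u h
    · rw [if_neg hsp] at ht
      refine ih (c :: cur) acc ?_ hacc t ht
      intro d hd
      rcases List.mem_cons.mp hd with h | h
      · subst h; exact eq_false_of_ne_true hsp
      · exact hcur d h

theorem pv_token_no_space (s t : List Char) (h : t ∈ PySem.Chars.split₀ s) :
    ∀ c ∈ t, PySem.Chars.isspace c = false :=
  pv_go_no_space s [] [] (by simp) (by simp) t h

theorem pv_strip_no_space (t : List Char) (h : ∀ c ∈ t, PySem.Chars.isspace c = false) :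
    PySem.Chars.strip t = t := by
  have hl : PySem.Chars.lstrip t = t := by
    unfold PySem.Chars.lstrip
    cases t with
    | nil => rfl
    | cons c r => simp [List.dropWhile, h c (List.mem_cons_self)]
  unfold PySem.Chars.strip
  rw [hl]
  unfold PySem.Chars.rstrip
  have : t.reverse.dropWhile PySem.Chars.isspace = t.reverse := by
    cases hr : t.reverse with
    | nil => simp
    | cons c r =>
      have hc : c ∈ t := by rw [← List.mem_reverse, hr]; exact List.mem_cons_self
      simp [List.dropWhile, h c hc]
  rw [this, List.reverse_reverse]

-- split₀ ignores leading whitespace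
theorem pv_split₀_lstrip (s : List Char) :
    PySem.Chars.split₀ (PySem.Chars.lstrip s) = PySem.Chars.split₀ s := by
  unfold PySem.Chars.split₀ PySem.Chars.lstrip
  induction s with
  | nil => rfl
  | cons c r ih =>
    by_cases hsp : PySem.Chars.isspace c = true
    · rw [List.dropWhile_cons_of_pos hsp]
      rw [ih]
      conv_rhs => rw [PySem.Chars.split₀.go]
      simp [hsp]
    · rw [List.dropWhile_cons_of_neg (by simp [hsp])]

-- split₀.go ignores trailing whitespace
theorem pv_go_append_space (s ws : List Char) (hws : ∀ c ∈ ws, PySem.Chars.isspace c = true) :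
    ∀ cur acc, PySem.Chars.split₀.go (s ++ ws) cur acc = PySem.Chars.split₀.go s cur acc := by
  induction s with
  | nil =>
    induction ws with
    | nil => intro cur acc; rfl
    | cons c w ihw =>
      intro cur acc
      have hc : PySem.Chars.isspace c = true := hws c List.mem_cons_self
      have ihw' := ihw (fun d hd => hws d (List.mem_cons_of_mem c hd))
      simp only [List.nil_append] at *
      rw [pv_go_cons, if_pos hc, pv_go_nil]
      by_cases hcur : cur.isEmpty
      · rw [if_pos hcur, if_pos hcur, ihw' [] acc, pv_go_nil]
        simp
      · rw [if_neg hcur, if_neg hcur, ihw' [] (cur.reverse :: acc), pv_go_nil]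
        simp
  | cons c r ih =>
    intro cur acc
    rw [List.cons_append, pv_go_cons, pv_go_cons]
    by_cases hsp : PySem.Chars.isspace c = true
    · rw [if_pos hsp, if_pos hsp]
      by_cases hcur : cur.isEmpty
      · rw [if_pos hcur, if_pos hcur, ih]
      · rw [if_neg hcur, if_neg hcur, ih]
    · rw [if_neg hsp, if_neg hsp, ih]

theorem pv_split₀_strip (s : List Char) :
    PySem.Chars.split₀ (PySem.Chars.strip s) = PySem.Chars.split₀ s := by
  unfold PySem.Chars.strip
  rw [← pv_split₀_lstrip s]
  set u := PySem.Chars.lstrip s with hu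
  have hdecomp : u = PySem.Chars.rstrip u ++ (u.reverse.takeWhile PySem.Chars.isspace).reverse := by
    unfold PySem.Chars.rstrip
    conv_lhs => rw [← List.reverse_reverse u, ← List.takeWhile_append_dropWhile (p := PySem.Chars.isspace) (l := u.reverse)]
    rw [List.reverse_append]
  have hws : ∀ c ∈ (u.reverse.takeWhile PySem.Chars.isspace).reverse, PySem.Chars.isspace c = true := by
    intro c hc
    exact List.mem_takeWhile_imp (List.mem_reverse.mp hc)
  conv_rhs => rw [hdecomp]
  unfold PySem.Chars.split₀
  rw [pv_go_append_space _ _ hws]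

-- stripping a split₀ token (or the [] default) is the identity
theorem pv_strip_token (tokens : List (List Char)) (s : List Char)
    (htok : tokens = PySem.Chars.split₀ s) (i : Int) :
    PySem.Chars.strip (PySem.List.pyGetD tokens i []) = PySem.List.pyGetD tokens i [] := by
  by_cases h : PySem.Raise.InRange tokens.length i
  · exact pv_strip_no_space _ (pv_token_no_space s _ (htok ▸ PySem.List.pyGetD_mem tokens [] h))
  · rw [PySem.List.pyGetD_of_none tokens i [] ((PySem.List.pyGet?_eq_none_iff tokens i).mpr h)]
    rfl

-- the two per-line bodies of A are the same function
theorem pv_lineStep2_eq : pvA_lineStep2 = pvA_lineStep := by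
  funext st line
  unfold pvA_lineStep pvA_lineStep2 pvRemoveprefix
  by_cases h1 : (PySem.Chars.startswith line ['#'] || decide (line.length < 3)) = true
  · rw [if_pos h1, if_pos h1]
  · rw [if_neg h1, if_neg h1]
    by_cases h2 : PySem.Chars.startswith line pvSep = true
    · rw [if_pos h2, if_pos h2]
    · rw [if_neg h2, if_neg h2]
      by_cases h3 : PySem.Chars.startswith line pvPref = true
      · rw [if_pos h3, if_pos h3, if_pos h3]
        have : PySem.List.slice line (some 12) none = line.drop pvPref.length := by
          rw [show ((12 : Int)) = ((12 : Nat) : Int) by norm_num,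
              PySem.List.slice_from_natCast]
          rfl
        rw [this]
      · rw [if_neg h3, if_neg h3]

-- one parsed line extends the chunk dict
theorem pv_parseChunk_append (cur : List (List Char)) (line : List Char) :
    pvF_parseChunk (cur ++ [line]) =
      (pvF_parseChunk cur).insert
        ((PySem.Int.ofChars? (PySem.List.pyGetD (PySem.Chars.split₀ (PySem.List.slice line (some 12) none)) 4 [])).getD 0)
        ((PySem.Int.ofChars? (PySem.List.pyGetD (PySem.Chars.split₀ (PySem.List.slice line (some 12) none)) 5 [])).getD 0) := by
  unfold pvF_parseChunk
  rw [List.foldl_append]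
  rfl

-- A's neg-branch parse of a '__valuation:' line equals the chunk parse of it
theorem pv_lineStep_parse (line : List Char) (h3 : PySem.Chars.startswith line pvPref = true)
    (st : List (PySem.Dict Int Int) × PySem.Dict Int Int)
    (h1 : (PySem.Chars.startswith line ['#'] || decide (line.length < 3)) = false)
    (h2 : PySem.Chars.startswith line pvSep = false) :
    pvA_lineStep st line =
      (st.1, st.2.insert
        ((PySem.Int.ofChars? (PySem.List.pyGetD (PySem.Chars.split₀ (PySem.List.slice line (some 12) none)) 4 [])).getD 0)
        ((PySem.Int.ofChars? (PySem.List.pyGetD (PySem.Chars.split₀ (PySem.List.slice line (some 12) none)) 5 [])).getD 0)) := by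
  unfold pvA_lineStep pvRemoveprefix
  rw [if_neg (by simp [h1]), if_neg (by simp [h2]), if_pos h3, if_pos h3]
  dsimp only
  have hs : PySem.List.slice line (some 12) none = line.drop pvPref.length := by
    rw [show ((12 : Int)) = ((12 : Nat) : Int) by norm_num, PySem.List.slice_from_natCast]
    rfl
  rw [hs, pv_split₀_strip,
      pv_strip_token _ _ rfl 4, pv_strip_token _ _ rfl 5]

-- simulation: A's interleaved fold is the parse of the forward chunk fold
theorem pv_simulation (lines : List (List Char)) :
    ∀ (cs : List (List (List Char))) (cur : List (List Char)),
    lines.foldl pvA_lineStep (cs.map pvF_parseChunk, pvF_parseChunk cur)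
      = ((lines.foldl pvF_chunkStep (cs, cur)).1.map pvF_parseChunk,
         pvF_parseChunk (lines.foldl pvF_chunkStep (cs, cur)).2) := by
  induction lines with
  | nil => intro cs cur; rfl
  | cons line rest ih =>
    intro cs cur
    rw [List.foldl_cons, List.foldl_cons]
    by_cases h1 : (PySem.Chars.startswith line ['#'] || decide (line.length < 3)) = true
    · rw [show pvA_lineStep (cs.map pvF_parseChunk, pvF_parseChunk cur) line
            = (cs.map pvF_parseChunk, pvF_parseChunk cur) by unfold pvA_lineStep; rw [if_pos h1],
          show pvF_chunkStep (cs, cur) line = (cs, cur) by unfold pvF_chunkStep; rw [if_pos h1]]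
      exact ih cs cur
    · by_cases h2 : PySem.Chars.startswith line pvSep = true
      · rw [show pvA_lineStep (cs.map pvF_parseChunk, pvF_parseChunk cur) line
              = (cs.map pvF_parseChunk ++ [pvF_parseChunk cur], PySem.Dict.empty) by
            unfold pvA_lineStep; rw [if_neg h1, if_pos h2],
            show pvF_chunkStep (cs, cur) line = (cs ++ [cur], []) by
            unfold pvF_chunkStep; rw [if_neg h1, if_pos h2]]
        have : (cs ++ [cur]).map pvF_parseChunk = cs.map pvF_parseChunk ++ [pvF_parseChunk cur] := by
          simp
        rw [← this, show (PySem.Dict.empty : PySem.Dict Int Int) = pvF_parseChunk [] from rfl]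
        exact ih (cs ++ [cur]) []
      · by_cases h3 : PySem.Chars.startswith line pvPref = true
        · rw [pv_lineStep_parse line h3 _ (by simpa using h1) (by simpa using h2),
              show pvF_chunkStep (cs, cur) line = (cs, cur ++ [line]) by
              unfold pvF_chunkStep; rw [if_neg h1, if_neg h2, if_pos h3]]
          rw [← pv_parseChunk_append]
          exact ih cs (cur ++ [line])
        · rw [show pvA_lineStep (cs.map pvF_parseChunk, pvF_parseChunk cur) line
                = (cs.map pvF_parseChunk, pvF_parseChunk cur) by
              unfold pvA_lineStep; rw [if_neg h1, if_neg h2, if_neg h3],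
              show pvF_chunkStep (cs, cur) line = (cs, cur) by
              unfold pvF_chunkStep; rw [if_neg h1, if_neg h2, if_neg h3]]
          exact ih cs cur

-- A's groups for one valuation = B's _dicts of it
theorem pv_groups_eq (v : String) :
    ((PySem.Chars.splitOn v.toList ['\n']).foldl pvA_lineStep ([], PySem.Dict.empty)).1
      = pvB_dicts v := by
  have hsim := pv_simulation (PySem.Chars.splitOn v.toList ['\n']) [] []
  simp only [List.map_nil] at hsim
  rw [show (PySem.Dict.empty : PySem.Dict Int Int) = pvF_parseChunk [] from rfl, hsim]
  unfold pvB_dicts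
  have hfil := pvF_fold_filter (PySem.Chars.splitOn v.toList ['\n']) ([], [])
  rw [hfil, pvF_fold_spec _ (fun l hl => List.of_mem_filter hl) [] []]
  rw [pvAttach_nil, List.nil_append]
  unfold pvB_relevant
  rw [pvB_chunks_spec]
  exact (List.map_congr_left fun c _ => (pvB_parse_eq_F c).symm) ▸ rfl

-- range-indexing a list reads it back
theorem pv_map_range_getD {α : Type} (xs : List α) (d : α) :
    (List.range xs.length).map (fun k => xs.getD k d) = xs := by
  apply List.ext_getElem
  · simp
  · intro i h1 h2
    simp [List.getD_eq_getElem?_getD, List.getElem?_eq_getElem h2]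

-- A's redistribution loop over groups = slice off the last, append it to neg
theorem pv_distrib (gs : List (PySem.Dict Int Int)) (x : PySem.Dict Int Int)
    (nv pv : List (List (Int × Int))) :
    (PySem.List.pyRange 0 (PySem.List.len (gs ++ [x])) 1).foldl (fun acc2 i =>
        if i < PySem.List.len (gs ++ [x]) - 1 then
          (acc2.1, acc2.2 ++ [(PySem.List.pyGetD (gs ++ [x]) i PySem.Dict.empty).items])
        else (acc2.1 ++ [(PySem.List.pyGetD (gs ++ [x]) i PySem.Dict.empty).items], acc2.2)) (nv, pv)
      = (nv ++ [x.items], pv ++ gs.map (fun g => g.items)) := by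
  have hlen : PySem.List.len (gs ++ [x]) = (gs.length : Int) + 1 := by
    simp [PySem.List.len_eq]
  rw [hlen]
  rw [PySem.List.pyRange_one_succ_right (by positivity), List.foldl_append]
  have hfirst : (PySem.List.pyRange 0 (gs.length : Int) 1).foldl (fun acc2 i =>
      if i < (gs.length : Int) + 1 - 1 then
        (acc2.1, acc2.2 ++ [(PySem.List.pyGetD (gs ++ [x]) i PySem.Dict.empty).items])
      else (acc2.1 ++ [(PySem.List.pyGetD (gs ++ [x]) i PySem.Dict.empty).items], acc2.2)) (nv, pv)
      = (nv, pv ++ gs.map (fun g => g.items)) := by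
    rw [PySem.List.foldl_congr_mem _ _ (fun acc2 i =>
        (acc2.1, acc2.2 ++ [(PySem.List.pyGetD gs i PySem.Dict.empty).items])) _ ?side]
    case _ =>
      rw [PySem.List.foldl_prod_mk (fun a (_ : Int) => a)
          (fun pv i => pv ++ [(PySem.List.pyGetD gs i PySem.Dict.empty).items])]
      rw [PySem.List.foldl_ignore, PySem.List.foldl_append_singleton_eq_map]
      congr 1
      rw [PySem.List.pyRange_one]
      simp only [sub_zero, Int.toNat_natCast, List.map_map]
      have : ((fun i => (PySem.List.pyGetD gs i PySem.Dict.empty).items) ∘ fun k : Nat => (0 : Int) + k)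
          = fun k : Nat => (gs.getD k PySem.Dict.empty).items := by
        funext k
        simp [PySem.List.pyGetD_natCast]
      rw [this, show (fun k : Nat => (gs.getD k PySem.Dict.empty).items)
          = (fun g : PySem.Dict Int Int => g.items) ∘ (fun k => gs.getD k PySem.Dict.empty) from rfl,
          ← List.map_map, pv_map_range_getD]
    case side =>
      intro acc2 i hi
      have hi' := PySem.List.mem_pyRange_one.mp hi
      have hlt : i < (gs.length : Int) + 1 - 1 := by omega
      rw [if_pos hlt]
      have : PySem.List.pyGetD (gs ++ [x]) i PySem.Dict.empty
          = PySem.List.pyGetD gs i PySem.Dict.empty := by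
        rw [PySem.List.pyGetD_eq_getElem (gs ++ [x]) _ (by omega) (by simp; omega),
            PySem.List.pyGetD_eq_getElem gs _ (by omega) (by exact_mod_cast hi'.2)]
        rw [List.getElem_append_left (by omega)]
      rw [this]
  rw [hfirst]
  simp only [List.foldl_cons, List.foldl_nil]
  rw [if_neg (by omega)]
  have : PySem.List.pyGetD (gs ++ [x]) (gs.length : Int) PySem.Dict.empty = x := by
    rw [PySem.List.pyGetD_natCast]
    simp
  rw [this]

-- the append contributed to (neg_vals, pos_vals) by one neg valuation
def pvNegPart (v : String) : List (List (Int × Int)) :=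
  if (pvB_dicts v).isEmpty then []
  else [(PySem.List.pyGetD (pvB_dicts v) (-1) PySem.Dict.empty).items]

def pvPosPart (v : String) : List (List (Int × Int)) :=
  (PySem.List.slice (pvB_dicts v) none (some (-1))).map PySem.Dict.items

-- A's per-neg-valuation step, characterized through B's _dicts
theorem pv_negStep_eq (acc : (List (List (Int × Int))) × (List (List (Int × Int)))) (v : String) :
    pvA_negStep acc v = (acc.1 ++ pvNegPart v, acc.2 ++ pvPosPart v) := by
  unfold pvA_negStep
  dsimp only
  rw [pv_groups_eq v]
  unfold pvNegPart pvPosPart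
  rcases List.eq_nil_or_concat (pvB_dicts v) with h | ⟨gs, x, h⟩
  · rw [h]; simp [PySem.List.len_eq, PySem.List.slice]
  · rw [h, List.concat_eq_append, pv_distrib]
    rw [if_neg (by simp)]
    rw [PySem.List.pyGetD_neg_one_append_singleton, PySem.List.slice_to_neg_one]
    simp

-- A's per-pos-valuation step, characterized the same way
theorem pv_posStep_eq (acc : (List (List (Int × Int))) × (List (List (Int × Int)))) (v : String) :
    pvA_posStep acc v = (acc.1, acc.2 ++ (pvB_dicts v).map PySem.Dict.items) := by
  unfold pvA_posStep
  dsimp only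
  rw [pv_lineStep2_eq, pv_groups_eq v]
  rw [PySem.List.foldl_append_singleton_eq_map]

-- a fold that appends per-element pieces to both components is a pair of flatMaps
theorem pv_fold_pair_flatMap {α : Type} (ls : List α)
    (f g : α → List (List (Int × Int))) :
    ∀ (a b : List (List (Int × Int))),
    ls.foldl (fun acc v => (acc.1 ++ f v, acc.2 ++ g v)) (a, b)
      = (a ++ ls.flatMap f, b ++ ls.flatMap g) := by
  induction ls with
  | nil => intro a b; simp
  | cons v r ih =>
    intro a b
    rw [List.foldl_cons, ih]
    simp

-- a fold that appends per-element pieces only to the second component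
theorem pv_fold_snd_flatMap {α : Type} (ls : List α)
    (g : α → List (List (Int × Int))) :
    ∀ (a b : List (List (Int × Int))),
    ls.foldl (fun acc v => (acc.1, acc.2 ++ g v)) (a, b)
      = (a, b ++ ls.flatMap g) := by
  induction ls with
  | nil => intro a b; simp
  | cons v r ih =>
    intro a b
    rw [List.foldl_cons, ih]
    simp

-- flatMap of the guarded-singleton form is the filter-then-map comprehension
theorem pv_flatMap_negPart (ls : List String) :
    ls.flatMap pvNegPart
      = ((ls.map pvB_dicts).filter (fun g => !g.isEmpty)).map
          (fun g => (PySem.List.pyGetD g (-1) PySem.Dict.empty).items) := by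
  induction ls with
  | nil => rfl
  | cons v r ih =>
    rw [List.flatMap_cons, List.map_cons, ih]
    by_cases h : (pvB_dicts v).isEmpty
    · rw [List.filter_cons_of_neg (by simp [h])]
      simp [pvNegPart, h]
    · rw [List.filter_cons_of_pos (by simp [h]), List.map_cons]
      simp [pvNegPart, h]

-- ===== VERDICT (by name: the statement is the Claim_ definition above) =====
theorem parse_valuations_uni_spec : Claim_equal_parse_valuations_uni := by
  intro neg pos _ _
  unfold Spec_parse_valuations_uni parse_valuations_uni parse_valuations_uni_alt
  dsimp only
  rw [PySem.List.foldl_congr_mem neg pvA_negStep _ ([], []) (fun acc v _ => pv_negStep_eq acc v),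
      pv_fold_pair_flatMap neg pvNegPart pvPosPart [] []]
  rw [PySem.List.foldl_congr_mem pos pvA_posStep
        (fun acc v => (acc.1, acc.2 ++ (pvB_dicts v).map PySem.Dict.items)) _
        (fun acc v _ => pv_posStep_eq acc v)]
  rw [pv_fold_snd_flatMap pos (fun v => (pvB_dicts v).map PySem.Dict.items)]
  rw [pv_flatMap_negPart neg]
  simp only [List.nil_append]
  have h1 : neg.flatMap pvPosPart
      = ((neg.map pvB_dicts).flatMap (fun g => PySem.List.slice g none (some (-1)))).map PySem.Dict.items := by
    unfold pvPosPart
    rw [List.flatMap_map, List.map_flatMap]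
  have h2 : pos.flatMap (fun v => (pvB_dicts v).map PySem.Dict.items)
      = (pos.flatMap pvB_dicts).map PySem.Dict.items := by
    rw [List.map_flatMap]
  rw [h1, h2]
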